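-- pv_equiv track=rewrite | github.com/981377660LMT/algorithm-study | 0_数组/左右扫两遍/1769. 移动所有球到每个盒子所需的最小操作数-左右扫两遍.py | minOperations2
-- ===== SOURCE A (Python) =====
-- from typing import List
--
-- def minOperations2(boxes: str) -> List[int]:
--     res = []
--     for i in range(len(boxes)):
--         count = 0
--         for j in range(len(boxes)):
--             if boxes[j] == '1':
--                 count += abs(j - i)
--         res.append(count)
--
--     return res
-- ===== SOURCE B (Python) =====
-- def minOperations2(boxes: str):
--     def sweep(s):
--         out = []
--         cnt = ops = 0
--         for c in s:
--             out.append(ops)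
--             cnt += c == '1'
--             ops += cnt
--         return out
--     left = sweep(boxes)
--     right = sweep(boxes[::-1])
--     return [l + r for l, r in zip(left, reversed(right))]
-- ===== Notes on version B (the rewrite author's own statement) =====
-- stated objective: faster
-- what changed: Replaced the quadratic all-pairs distance scan by two linear prefix sweeps (running ball count and running cost from the left and from the right) combined per index.
import Mathlib
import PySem

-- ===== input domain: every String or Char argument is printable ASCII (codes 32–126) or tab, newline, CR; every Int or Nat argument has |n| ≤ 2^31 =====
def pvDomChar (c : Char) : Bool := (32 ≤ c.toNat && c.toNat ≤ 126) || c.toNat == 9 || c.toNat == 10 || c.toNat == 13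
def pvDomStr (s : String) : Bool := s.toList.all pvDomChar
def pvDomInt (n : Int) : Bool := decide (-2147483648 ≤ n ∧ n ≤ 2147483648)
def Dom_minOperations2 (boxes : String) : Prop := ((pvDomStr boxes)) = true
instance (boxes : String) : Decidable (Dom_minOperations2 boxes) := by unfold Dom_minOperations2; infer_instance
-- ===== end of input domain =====

-- B replaces A's quadratic all-pairs distance scan by two linear prefix sweeps combined per index.

-- ===== PORT A =====
def minOperations2 (boxes : String) : List Int :=
  (PySem.List.pyRange 0 (PySem.Str.len boxes) 1).foldl (fun res i =>
    res ++ [(PySem.List.pyRange 0 (PySem.Str.len boxes) 1).foldl (fun count j =>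
      if PySem.Str.pyGet? boxes j = some '1' then count + |j - i| else count) 0]) []

-- ===== PORT B =====
-- sweep(s): one left-to-right pass returning the cost of moving all balls of each prefix to its end
def pvSweep (s : List Char) : List Int :=
  (s.foldl (fun (st : List Int × Int × Int) c =>
      (st.1 ++ [st.2.2],
       st.2.1 + (if c = '1' then (1 : Int) else 0),
       st.2.2 + (st.2.1 + (if c = '1' then (1 : Int) else 0))))
    ([], 0, 0)).1

-- boxes[::-1] is ported as .reverse (exact: PySem.List.slice?_none_none_neg_one)
def minOperations2_alt (boxes : String) : List Int :=
  List.zipWith (fun l r => l + r) (pvSweep boxes.toList) (pvSweep boxes.toList.reverse).reverse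

-- ===== PRECONDITION & SPEC =====
def Spec_minOperations2 (boxes : String) (out : List Int) : Prop := out = minOperations2_alt boxes
instance (boxes : String) (out : List Int) : Decidable (Spec_minOperations2 boxes out) := by unfold Spec_minOperations2; infer_instance

-- ===== CLAIM (what is proved, stated in full; the proofs are below) =====
def Claim_equal_minOperations2 : Prop := ∀ (boxes : String), Dom_minOperations2 boxes → Spec_minOperations2 boxes (minOperations2 boxes)

-- ===== LEMMAS AND PROOFS =====

-- indicator of a ball
def pvInd (c : Char) : Int := if c = '1' then 1 else 0

-- A's inner sum: pvSA s i = Σ_j |j - i| over positions j of s holding '1', positions counted from i downward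
def pvSA : List Char → Int → Int
  | [], _ => 0
  | c :: s, i => (if c = '1' then |i| else 0) + pvSA s (i - 1)

-- left part: Σ_{j<i} (i-j)·ind(s_j)
def pvL : List Char → Int → Int
  | [], _ => 0
  | c :: s, i => (if 0 < i then i * pvInd c else 0) + pvL s (i - 1)

-- right part: Σ_{j>i} (j-i)·ind(s_j)
def pvR : List Char → Int → Int
  | [], _ => 0
  | c :: s, i => (if i < 0 then (-i) * pvInd c else 0) + pvR s (i - 1)

lemma pvSA_eq_L_add_R (s : List Char) : ∀ i : Int, pvSA s i = pvL s i + pvR s i := by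
  induction s with
  | nil => intro i; simp [pvSA, pvL, pvR]
  | cons c s ih =>
    intro i
    simp only [pvSA, pvL, pvR, ih (i - 1), pvInd]
    rcases lt_trichotomy i 0 with h | h | h
    · rw [abs_of_neg h]; split_ifs <;> first | ring1 | (exfalso; omega)
    · subst h; simp
    · rw [abs_of_pos h]; split_ifs <;> first | ring1 | (exfalso; omega)

lemma pvL_nonpos (s : List Char) : ∀ i : Int, i ≤ 0 → pvL s i = 0 := by
  induction s with
  | nil => intro i _; rfl
  | cons c s ih =>
    intro i hi
    simp only [pvL, if_neg (by omega : ¬ (0:Int) < i), ih (i-1) (by omega)]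
    omega

lemma pvL_snoc (s : List Char) (c : Char) : ∀ i : Int,
    pvL (s ++ [c]) i = pvL s i + (if (s.length : Int) < i then (i - s.length) * pvInd c else 0) := by
  induction s with
  | nil => intro i; simp [pvL]
  | cons c' s ih =>
    intro i
    simp only [List.cons_append, pvL, ih (i - 1), List.length_cons]
    have h1 : ((s.length : Int) < i - 1) = (((s.length + 1 : Nat) : Int) < i) := by
      simp only [eq_iff_iff]; push_cast; omega
    have h2 : i - 1 - (s.length : Int) = i - ((s.length + 1 : Nat) : Int) := by push_cast; ring
    simp only [h1, h2]; ring

lemma pvR_eq_L_reverse (s : List Char) : ∀ i : Int,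
    pvR s i = pvL s.reverse ((s.length : Int) - 1 - i) := by
  induction s with
  | nil => intro i; rfl
  | cons c s ih =>
    intro i
    simp only [pvR, ih (i - 1), List.reverse_cons, pvL_snoc, List.length_reverse, List.length_cons]
    have h1 : (s.length : Int) - 1 - (i - 1) = ((s.length + 1 : Nat) : Int) - 1 - i := by push_cast; ring
    have h2 : ((s.length : Int) < ((s.length + 1 : Nat) : Int) - 1 - i) = (i < 0) := by
      simp only [eq_iff_iff]; push_cast; omega
    have h3 : ((s.length + 1 : Nat) : Int) - 1 - i - (s.length : Int) = -i := by push_cast; ring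
    simp only [h1, h2, h3]; ring

-- A's inner fold computes pvSA
lemma innerA_spec (s : List Char) : ∀ (i acc : Int),
    (PySem.List.pyRange 0 (s.length) 1).foldl
      (fun count j => if PySem.List.pyGet? s j = some '1' then count + |j - i| else count) acc
    = acc + pvSA s i := by
  induction s with
  | nil => intro i acc; simp [pvSA, PySem.List.pyRange_one_eq_nil]
  | cons c s ih =>
    intro i acc
    have hlen : ((((c :: s).length : Int)) - 0).toNat = s.length + 1 := by simp
    rw [PySem.List.pyRange_one, hlen, List.range_succ_eq_map]
    rw [PySem.List.pyRange_one] at ih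
    simp only [List.map_cons, List.map_map, List.foldl_cons, List.foldl_map, Function.comp]
    have h0 : PySem.List.pyGet? (c :: s) ((0 : Int) + ((0 : Nat) : Int)) = some c := by
      simp
    have hstep : (fun (count : Int) (k : Nat) =>
        if PySem.List.pyGet? (c :: s) ((0 : Int) + ((Nat.succ k : Nat) : Int)) = some '1'
        then count + |(0 : Int) + ((Nat.succ k : Nat) : Int) - i| else count)
      = (fun (count : Int) (k : Nat) =>
        if PySem.List.pyGet? s ((0 : Int) + ((k : Nat) : Int)) = some '1'
        then count + |(0 : Int) + ((k : Nat) : Int) - (i - 1)| else count) := by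
      funext count k
      have hg : PySem.List.pyGet? (c :: s) ((0 : Int) + ((Nat.succ k : Nat) : Int))
          = PySem.List.pyGet? s ((0 : Int) + ((k : Nat) : Int)) := by
        have e1 : (0 : Int) + ((Nat.succ k : Nat) : Int) = ((k + 1 : Nat) : Int) := by push_cast; ring
        have e2 : (0 : Int) + ((k : Nat) : Int) = ((k : Nat) : Int) := by ring
        rw [e1, e2, PySem.List.pyGet?_natCast, PySem.List.pyGet?_natCast]
        simp
      have ha : |(0 : Int) + ((Nat.succ k : Nat) : Int) - i| = |(0 : Int) + ((k : Nat) : Int) - (i - 1)| := by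
        congr 1; push_cast; ring
      rw [hg, ha]
    rw [hstep]
    have ihlen : ((s.length : Int) - 0).toNat = s.length := by simp
    have ih' := ih (i - 1) (if PySem.List.pyGet? (c :: s) ((0:Int) + ((0:Nat) : Int)) = some '1' then acc + |(0:Int) + ((0:Nat):Int) - i| else acc)
    rw [ihlen, List.foldl_map] at ih'
    rw [ih', h0]
    simp only [pvSA, Option.some_inj]
    have habs : |(0 : Int) + ((0 : Nat) : Int) - i| = |i| := by
      have : (0 : Int) + ((0 : Nat) : Int) - i = -i := by push_cast; ring
      rw [this, abs_neg]
    by_cases hc : c = '1'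
    · rw [if_pos hc, if_pos hc, habs]; ring
    · rw [if_neg hc, if_neg hc]; ring

-- B's sweep fold computes pvOut
def pvOut : List Char → Int → Int → List Int
  | [], _, _ => []
  | c :: s, cnt, ops => ops :: pvOut s (cnt + pvInd c) (ops + cnt + pvInd c)

lemma pvSweep_spec (s : List Char) : ∀ (out : List Int) (cnt ops : Int),
    (s.foldl (fun (st : List Int × Int × Int) c =>
      (st.1 ++ [st.2.2],
       st.2.1 + (if c = '1' then (1 : Int) else 0),
       st.2.2 + (st.2.1 + (if c = '1' then (1 : Int) else 0))))
      (out, cnt, ops)).1 = out ++ pvOut s cnt ops := by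
  induction s with
  | nil => intro out cnt ops; simp [pvOut]
  | cons c s ih =>
    intro out cnt ops
    simp only [List.foldl_cons, ih, pvOut, pvInd, List.append_assoc, List.singleton_append]
    have h : ops + (cnt + (if c = '1' then (1:Int) else 0)) = ops + cnt + (if c = '1' then (1:Int) else 0) := by ring
    rw [h]

lemma pvOut_length (s : List Char) : ∀ cnt ops, (pvOut s cnt ops).length = s.length := by
  induction s with
  | nil => intro _ _; rfl
  | cons c s ih => intro cnt ops; simp [pvOut, ih]

lemma pvOut_get (s : List Char) : ∀ (cnt ops : Int) (m : Nat), m < s.length →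
    (pvOut s cnt ops)[m]? = some (ops + m * cnt + pvL s m) := by
  induction s with
  | nil => intro _ _ m hm; simp at hm
  | cons c s ih =>
    intro cnt ops m hm
    cases m with
    | zero =>
      simp [pvOut, pvL, pvL_nonpos s (-1) (by omega)]
    | succ m =>
      have hm' : m < s.length := by simpa using hm
      simp only [pvOut, List.getElem?_cons_succ, ih _ _ m hm']
      congr 1
      have : pvL (c :: s) ((m + 1 : Nat) : Int) = ((m + 1 : Nat) : Int) * pvInd c + pvL s m := by
        simp only [pvL]
        rw [if_pos (by push_cast; omega)]
        congr 2
        push_cast; ring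
      rw [this]
      push_cast; ring

lemma pvSweep_eq (s : List Char) : pvSweep s = pvOut s 0 0 := by
  simpa [pvSweep] using pvSweep_spec s [] 0 0

lemma pvOut_getElem (s : List Char) (cnt ops : Int) (m : Nat) (h : m < (pvOut s cnt ops).length) :
    (pvOut s cnt ops)[m] = ops + m * cnt + pvL s m := by
  have hm : m < s.length := by rw [pvOut_length] at h; exact h
  have hg := pvOut_get s cnt ops m hm
  rw [List.getElem?_eq_getElem h] at hg
  exact Option.some.inj hg

-- ===== VERDICT (by name: the statement is the Claim_ definition above) =====
theorem minOperations2_spec : Claim_equal_minOperations2 := by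
  intro boxes _
  unfold Spec_minOperations2 minOperations2 minOperations2_alt
  rw [PySem.List.foldl_append_singleton_eq_map, List.nil_append, pvSweep_eq, pvSweep_eq]
  simp only [PySem.Str.len_eq, PySem.Str.pyGet?_eq, PySem.Chars.pyGet?_eq_listPyGet?]
  apply List.ext_getElem
  · simp [PySem.List.length_pyRange_one, pvOut_length]
  · intro m h1 h2
    have hm : m < boxes.toList.length := by
      simp only [List.length_map, PySem.List.length_pyRange_one] at h1
      omega
    simp only [List.getElem_map, PySem.List.getElem_pyRange_one]
    rw [innerA_spec boxes.toList ((0 : Int) + (m : Int)) 0]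
    rw [List.getElem_zipWith]
    rw [List.getElem_reverse]
    rw [pvOut_getElem, pvOut_getElem]
    have hlr : (pvOut boxes.toList.reverse 0 0).length - 1 - m = boxes.toList.length - 1 - m := by
      rw [pvOut_length, List.length_reverse]
    rw [hlr]
    have ecast : ((boxes.toList.length - 1 - m : Nat) : Int) = (boxes.toList.length : Int) - 1 - (m : Int) := by
      omega
    rw [ecast]
    have e1 : (0 : Int) + (m : Int) = (m : Int) := by ring
    rw [e1, pvSA_eq_L_add_R, pvR_eq_L_reverse]
    ring
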